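-- pv_equiv track=rewrite | github.com/alxleo/docker-images | pr-reviewer/scripts/diff.py | preprocess_diff
-- ===== SOURCE A (Python) =====
-- _EXT_TO_LANG = {
--     ".py": "Python", ".js": "JavaScript", ".ts": "TypeScript", ".tsx": "TypeScript",
--     ".go": "Go", ".rs": "Rust", ".rb": "Ruby", ".java": "Java", ".kt": "Kotlin",
--     ".sh": "Shell", ".bash": "Shell", ".zsh": "Shell",
--     ".yml": "YAML", ".yaml": "YAML", ".toml": "TOML", ".json": "JSON",
--     ".md": "Markdown", ".tf": "Terraform", ".hcl": "HCL",
--     ".dockerfile": "Dockerfile", ".sql": "SQL", ".css": "CSS", ".html": "HTML",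
-- }
--
-- def preprocess_diff(raw_diff: str, max_tokens: int = 30000) -> str:
--     """Preprocess a unified diff for better LLM consumption.
--
--     1. Strip delete-only files (files with no additions — reviews focus on new code)
--     2. Annotate files with language
--     3. If over token budget, sort files by size and truncate
--     """
--     if not raw_diff.strip():
--         return raw_diff
--
--     files: list[tuple[str, str]] = []
--     current_file = ""
--     current_lines: list[str] = []
--
--     for line in raw_diff.splitlines(keepends=True):
--         if line.startswith("diff --git "):
--             if current_file and current_lines:
--                 files.append((current_file, "".join(current_lines)))
--             current_lines = [line]
--             parts = line.strip().split(" b/", 1)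
--             current_file = parts[1] if len(parts) > 1 else ""
--         else:
--             current_lines.append(line)
--
--     if current_file and current_lines:
--         files.append((current_file, "".join(current_lines)))
--
--     if not files:
--         return raw_diff
--
--     processed = []
--     for filename, diff_text in files:
--         has_additions = any(
--             line.startswith("+") and not line.startswith("+++")
--             for line in diff_text.splitlines()
--         )
--         if not has_additions:
--             continue
--
--         ext = "." + filename.rsplit(".", 1)[-1] if "." in filename else ""
--         lang = _EXT_TO_LANG.get(ext.lower(), "")
--         if "dockerfile" in filename.lower():
--             lang = "Dockerfile"
--         header = f"## {filename}" + (f" [{lang}]" if lang else "") + "\n"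
--         processed.append((filename, header + diff_text))
--
--     total_chars = sum(len(d) for _, d in processed)
--     token_estimate = total_chars // 4
--
--     if token_estimate > max_tokens:
--         processed.sort(key=lambda x: len(x[1]))
--         kept = []
--         budget = max_tokens * 4
--         used = 0
--         skipped = []
--         for filename, diff_text in processed:
--             if used + len(diff_text) > budget:
--                 skipped.append(filename)
--             else:
--                 kept.append(diff_text)
--                 used += len(diff_text)
--         result = "\n".join(kept)
--         if skipped:
--             result += f"\n\n(Skipped {len(skipped)} large files due to token budget: {', '.join(skipped)})\n"
--         return result
--
--     return "\n".join(d for _, d in processed)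
-- ===== SOURCE B (Python) =====
-- _EXT_TO_LANG = {
--     ".py": "Python", ".js": "JavaScript", ".ts": "TypeScript", ".tsx": "TypeScript",
--     ".go": "Go", ".rs": "Rust", ".rb": "Ruby", ".java": "Java", ".kt": "Kotlin",
--     ".sh": "Shell", ".bash": "Shell", ".zsh": "Shell",
--     ".yml": "YAML", ".yaml": "YAML", ".toml": "TOML", ".json": "JSON",
--     ".md": "Markdown", ".tf": "Terraform", ".hcl": "HCL",
--     ".dockerfile": "Dockerfile", ".sql": "SQL", ".css": "CSS", ".html": "HTML",
-- }
--
-- _MARK = "diff --git "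
--
--
-- def _name_of(marker_line: str) -> str:
--     parts = marker_line.strip().split(" b/", 1)
--     return parts[1] if len(parts) > 1 else ""
--
--
-- def _split_chunks(lines):
--     """Cut the keepends line list into per-file chunks, each starting at a marker."""
--     rest = lines
--     while rest and not rest[0].startswith(_MARK):
--         rest = rest[1:]
--     chunks = []
--     while rest:
--         k = 1
--         while k < len(rest) and not rest[k].startswith(_MARK):
--             k += 1
--         chunks.append(rest[:k])
--         rest = rest[k:]
--     return chunks
--
--
-- def _has_additions(diff_text: str) -> bool:
--     return any(
--         line.startswith("+") and not line.startswith("+++")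
--         for line in diff_text.splitlines()
--     )
--
--
-- def _header(filename: str) -> str:
--     ext = "." + filename.rsplit(".", 1)[-1] if "." in filename else ""
--     lang = _EXT_TO_LANG.get(ext.lower(), "")
--     if "dockerfile" in filename.lower():
--         lang = "Dockerfile"
--     return f"## {filename}" + (f" [{lang}]" if lang else "") + "\n"
--
--
-- def preprocess_diff(raw_diff: str, max_tokens: int = 30000) -> str:
--     if not raw_diff.strip():
--         return raw_diff
--
--     chunks = _split_chunks(raw_diff.splitlines(keepends=True))
--     named = [(_name_of(c[0]), "".join(c)) for c in chunks]
--     files = [fc for fc in named if fc[0]]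
--
--     if not files:
--         return raw_diff
--
--     processed = [(name, _header(name) + text)
--                  for name, text in files if _has_additions(text)]
--
--     total_chars = sum(len(d) for _, d in processed)
--     if total_chars // 4 <= max_tokens:
--         return "\n".join(d for _, d in processed)
--
--     # over budget: the greedy keep over the ascending-by-size order is exactly
--     # the longest prefix that fits, so find the cut index and slice
--     ordered = sorted(processed, key=lambda x: len(x[1]))
--     sizes = [len(d) for _, d in ordered]
--     budget = max_tokens * 4
--     k = 0
--     acc = 0
--     while k < len(sizes) and acc + sizes[k] <= budget:
--         acc += sizes[k]
--         k += 1
--     result = "\n".join(d for _, d in ordered[:k])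
--     skipped = [f for f, _ in ordered[k:]]
--     if skipped:
--         result += f"\n\n(Skipped {len(skipped)} large files due to token budget: {', '.join(skipped)})\n"
--     return result
-- ===== Notes on version B (the rewrite author's own statement) =====
-- stated objective: alternative
-- what changed: The stateful accumulator parse is replaced by a boundary/span chunker that slices the keepends line list between consecutive git-file marker lines, the annotate loop with continue becomes a filter+map pipeline, and the greedy kept/skipped fold over the size-sorted list is replaced by computing the longest-fitting-prefix cut index and slicing (correct because after the first skip every later file is at least as large).
import Mathlib
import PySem

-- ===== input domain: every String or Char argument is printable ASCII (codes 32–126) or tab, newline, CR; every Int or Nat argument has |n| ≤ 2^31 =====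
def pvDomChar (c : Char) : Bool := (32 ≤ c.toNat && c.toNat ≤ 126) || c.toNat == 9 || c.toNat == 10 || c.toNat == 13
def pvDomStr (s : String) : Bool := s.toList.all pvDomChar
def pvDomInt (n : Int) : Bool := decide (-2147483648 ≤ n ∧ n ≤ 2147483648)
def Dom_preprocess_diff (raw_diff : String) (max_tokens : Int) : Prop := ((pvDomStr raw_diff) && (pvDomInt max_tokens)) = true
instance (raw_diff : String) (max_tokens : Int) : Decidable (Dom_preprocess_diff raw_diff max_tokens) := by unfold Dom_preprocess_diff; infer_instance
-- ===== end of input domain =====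

-- B replaces A's stateful accumulator parse by a marker-boundary span chunker, the
-- annotate loop by a filter+map pipeline, and the greedy kept/skipped fold by a
-- longest-fitting-prefix cut of the size-sorted list (alternative decomposition, same cost).

-- ===== shared primitives (both Pythons invoke the same built-ins / module constants) =====

def pvMark : List Char := "diff --git ".toList

-- hand port of str.splitlines(keepends=True): exact on the domain's characters,
-- whose only line boundaries are '\n', '\r' and '\r\n'
def pvSplitKE (acc : List Char) : List Char → List (List Char)
  | [] => if acc.isEmpty then [] else [acc.reverse]
  | '\r' :: '\n' :: rest => (acc.reverse ++ ['\r', '\n']) :: pvSplitKE [] rest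
  | '\r' :: rest => (acc.reverse ++ ['\r']) :: pvSplitKE [] rest
  | '\n' :: rest => (acc.reverse ++ ['\n']) :: pvSplitKE [] rest
  | c :: rest => pvSplitKE (c :: acc) rest

-- line.strip().split(" b/", 1); parts[1] if len(parts) > 1 else ""
def pvNameOf (line : List Char) : List Char :=
  let parts := PySem.Chars.splitOnMax (PySem.Chars.strip line) " b/".toList 1
  if parts.length > 1 then parts.getD 1 [] else []

-- the module constant _EXT_TO_LANG; .get(k, "") = first-match lookup with default
def pvExtLang : List (List Char × List Char) :=
  [(".py".toList, "Python".toList), (".js".toList, "JavaScript".toList),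
   (".ts".toList, "TypeScript".toList), (".tsx".toList, "TypeScript".toList),
   (".go".toList, "Go".toList), (".rs".toList, "Rust".toList), (".rb".toList, "Ruby".toList),
   (".java".toList, "Java".toList), (".kt".toList, "Kotlin".toList),
   (".sh".toList, "Shell".toList), (".bash".toList, "Shell".toList), (".zsh".toList, "Shell".toList),
   (".yml".toList, "YAML".toList), (".yaml".toList, "YAML".toList), (".toml".toList, "TOML".toList),
   (".json".toList, "JSON".toList), (".md".toList, "Markdown".toList), (".tf".toList, "Terraform".toList),
   (".hcl".toList, "HCL".toList), (".dockerfile".toList, "Dockerfile".toList),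
   (".sql".toList, "SQL".toList), (".css".toList, "CSS".toList), (".html".toList, "HTML".toList)]

-- filename.rsplit(".", 1)[-1] (the part after the last '.'; exact when '.' ∈ filename)
def pvLastAfterDot (name : List Char) : List Char :=
  (name.reverse.takeWhile (fun c => c ≠ '.')).reverse

-- any(line.startswith("+") and not line.startswith("+++") for line in diff_text.splitlines())
def pvHasAdd (text : List Char) : Bool :=
  (PySem.Chars.splitlines text).any
    (fun l => PySem.Chars.startswith l ['+'] && !PySem.Chars.startswith l "+++".toList)

-- f"\n\n(Skipped {len(skipped)} large files due to token budget: {', '.join(skipped)})\n"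
def pvSkipMsg (skipped : List (List Char)) : List Char :=
  "\n\n(Skipped ".toList ++ PySem.Int.toChars (skipped.length : Int)
    ++ " large files due to token budget: ".toList
    ++ PySem.Chars.join ", ".toList skipped ++ ")\n".toList

-- ===== PORT A =====

-- one iteration of A's parsing loop over (files, current_file, current_lines)
def pvStepA (st : List (List Char × List Char) × List Char × List (List Char)) (line : List Char) :
    List (List Char × List Char) × List Char × List (List Char) :=
  if PySem.Chars.startswith line pvMark then
    ((if !st.2.1.isEmpty && !st.2.2.isEmpty then
        st.1 ++ [(st.2.1, PySem.Chars.join [] st.2.2)] else st.1),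
     pvNameOf line, [line])
  else (st.1, st.2.1, st.2.2 ++ [line])

def preprocess_diff (raw_diff : String) (max_tokens : Int) : String :=
  if (PySem.Chars.strip raw_diff.toList).isEmpty then raw_diff
  else
    let st := (pvSplitKE [] raw_diff.toList).foldl pvStepA ([], [], [])
    let files := if !st.2.1.isEmpty && !st.2.2.isEmpty then
        st.1 ++ [(st.2.1, PySem.Chars.join [] st.2.2)] else st.1
    if files.isEmpty then raw_diff
    else
      let processed := files.foldl (fun acc fd =>
        if !pvHasAdd fd.2 then acc
        else
          let ext := if PySem.Chars.isIn ['.'] fd.1 then '.' :: pvLastAfterDot fd.1 else []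
          let lang := (pvExtLang.lookup (PySem.Chars.lower ext)).getD []
          let lang := if PySem.Chars.isIn "dockerfile".toList (PySem.Chars.lower fd.1) then
              "Dockerfile".toList else lang
          let header := "## ".toList ++ fd.1
            ++ (if !lang.isEmpty then " [".toList ++ lang ++ "]".toList else []) ++ ['\n']
          acc ++ [(fd.1, header ++ fd.2)]) []
      let total : Int := (processed.map (fun fd => (fd.2.length : Int))).sum
      if PySem.Int.floordiv total 4 > max_tokens then
        let ordered := PySem.List.sorted processed (fun x => x.2.length)
        let budget := max_tokens * 4
        let fin := ordered.foldl
          (fun (st : List (List Char) × Int × List (List Char)) fd =>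
            if st.2.1 + (fd.2.length : Int) > budget then (st.1, st.2.1, st.2.2 ++ [fd.1])
            else (st.1 ++ [fd.2], st.2.1 + (fd.2.length : Int), st.2.2))
          ([], 0, [])
        let result := PySem.Chars.join ['\n'] fin.1
        if !fin.2.2.isEmpty then String.ofList (result ++ pvSkipMsg fin.2.2)
        else String.ofList result
      else String.ofList (PySem.Chars.join ['\n'] (processed.map (·.2)))

-- ===== PORT B =====

-- while rest and not rest[0].startswith(_MARK): rest = rest[1:]
def pvDropPre : List (List Char) → List (List Char)
  | [] => []
  | l :: t => if PySem.Chars.startswith l pvMark then l :: t else pvDropPre t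

-- inner while: k = 1 + number of following non-marker lines; chunk = rest[:k]; rest = rest[k:]
def pvChunks : List (List Char) → List (List (List Char))
  | [] => []
  | h :: t =>
    let k := (t.takeWhile (fun l => !PySem.Chars.startswith l pvMark)).length + 1
    ((h :: t).take k) :: pvChunks ((h :: t).drop k)
  termination_by l => l.length
  decreasing_by simp

-- _header(filename)
def pvHeader (name : List Char) : List Char :=
  let ext := if PySem.Chars.isIn ['.'] name then '.' :: pvLastAfterDot name else []
  let lang := (pvExtLang.lookup (PySem.Chars.lower ext)).getD []
  let lang := if PySem.Chars.isIn "dockerfile".toList (PySem.Chars.lower name) then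
      "Dockerfile".toList else lang
  "## ".toList ++ name
    ++ (if !lang.isEmpty then " [".toList ++ lang ++ "]".toList else []) ++ ['\n']

-- while k < len(sizes) and acc + sizes[k] <= budget: acc += sizes[k]; k += 1
def pvCut : List Int → Int → Int → Nat
  | [], _, _ => 0
  | s :: t, acc, budget => if acc + s ≤ budget then pvCut t (acc + s) budget + 1 else 0

def preprocess_diff_alt (raw_diff : String) (max_tokens : Int) : String :=
  if (PySem.Chars.strip raw_diff.toList).isEmpty then raw_diff
  else
    let chunks := pvChunks (pvDropPre (pvSplitKE [] raw_diff.toList))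
    -- c[0]: every chunk starts with its marker line, so the head exists
    let named := chunks.map (fun c => (pvNameOf (c.headD []), PySem.Chars.join [] c))
    let files := named.filter (fun fc => !fc.1.isEmpty)
    if files.isEmpty then raw_diff
    else
      let processed := (files.filter (fun fd => pvHasAdd fd.2)).map
        (fun fd => (fd.1, pvHeader fd.1 ++ fd.2))
      let total : Int := (processed.map (fun fd => (fd.2.length : Int))).sum
      if PySem.Int.floordiv total 4 > max_tokens then
        let ordered := PySem.List.sorted processed (fun x => x.2.length)
        let k := pvCut (ordered.map (fun fd => (fd.2.length : Int))) 0 (max_tokens * 4)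
        let result := PySem.Chars.join ['\n'] ((ordered.take k).map (·.2))
        let skipped := (ordered.drop k).map (·.1)
        if !skipped.isEmpty then String.ofList (result ++ pvSkipMsg skipped)
        else String.ofList result
      else String.ofList (PySem.Chars.join ['\n'] (processed.map (·.2)))

-- ===== PRECONDITION & SPEC =====
def Spec_preprocess_diff (raw_diff : String) (max_tokens : Int) (out : String) : Prop := out = preprocess_diff_alt raw_diff max_tokens
instance (raw_diff : String) (max_tokens : Int) (out : String) : Decidable (Spec_preprocess_diff raw_diff max_tokens out) := by unfold Spec_preprocess_diff; infer_instance

-- ===== CLAIM (what is proved, stated in full; the proofs are below) =====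
def Claim_equal_preprocess_diff : Prop := ∀ (raw_diff : String) (max_tokens : Int), Dom_preprocess_diff raw_diff max_tokens → Spec_preprocess_diff raw_diff max_tokens (preprocess_diff raw_diff max_tokens)

-- ===== LEMMAS AND PROOFS =====

-- abbreviations used only by the proofs
def pvP (l : List Char) : Bool := !PySem.Chars.startswith l pvMark

def pvFlush (cf : List Char) (cl : List (List Char)) : List (List Char × List Char) :=
  if !cf.isEmpty && !cl.isEmpty then [(cf, PySem.Chars.join [] cl)] else []

def pvFilesOf (chunks : List (List (List Char))) : List (List Char × List Char) :=
  (chunks.map (fun c => (pvNameOf (c.headD []), PySem.Chars.join [] c))).filter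
    (fun fc => !fc.1.isEmpty)

theorem pvDropPre_eq_dropWhile (l : List (List Char)) : pvDropPre l = l.dropWhile pvP := by
  induction l with
  | nil => rfl
  | cons h t ih =>
    simp only [pvDropPre, List.dropWhile, pvP]
    cases hph : PySem.Chars.startswith h pvMark <;> simp [ih]

theorem pv_take_takeWhile {α : Type} (p : α → Bool) (t : List α) :
    t.take (t.takeWhile p).length = t.takeWhile p :=
  (List.prefix_iff_eq_take.mp (List.takeWhile_prefix p)).symm

theorem pv_drop_takeWhile {α : Type} (p : α → Bool) (t : List α) :
    t.drop (t.takeWhile p).length = t.dropWhile p := by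
  induction t with
  | nil => rfl
  | cons h t ih =>
    simp only [List.takeWhile, List.dropWhile]
    cases p h <;> simp [ih]

theorem pv_takeWhile_dropWhile {α : Type} (p : α → Bool) (t : List α) :
    (t.dropWhile p).takeWhile p = [] := by
  induction t with
  | nil => rfl
  | cons h t ih =>
    simp only [List.dropWhile]
    cases hp : p h <;> simp [ih, List.takeWhile, hp]

-- A's loop absorbs a run of non-marker lines into current_lines
theorem pv_absorb : ∀ (body : List (List Char)), (∀ l ∈ body, pvP l = true) →
    ∀ (t2 : List (List Char)) (fs : List (List Char × List Char)) (cf : List Char)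
      (cl : List (List Char)),
      (body ++ t2).foldl pvStepA (fs, cf, cl) = t2.foldl pvStepA (fs, cf, cl ++ body) := by
  intro body
  induction body with
  | nil => intro _ t2 fs cf cl; simp
  | cons b bs ih =>
    intro hb t2 fs cf cl
    have hb' : PySem.Chars.startswith b pvMark = false := by
      have := hb b (by simp)
      simpa [pvP] using this
    simp only [List.cons_append, List.foldl_cons]
    rw [show pvStepA (fs, cf, cl) b = (fs, cf, cl ++ [b]) from by simp [pvStepA, hb']]
    rw [ih (fun l hl => hb l (by simp [hl])) t2 fs cf (cl ++ [b])]
    simp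

-- the marker step of A's loop flushes the pending file
theorem pv_step_marker (fs : List (List Char × List Char)) (cf : List Char)
    (cl : List (List Char)) (l : List Char) (hl : PySem.Chars.startswith l pvMark = true) :
    pvStepA (fs, cf, cl) l = (fs ++ pvFlush cf cl, pvNameOf l, [l]) := by
  simp only [pvStepA, hl, if_pos, pvFlush]
  split <;> simp

-- a one-chunk step of B's chunker contributes exactly A's flush of that chunk
theorem pv_filesOf_cons (l : List Char) (body : List (List Char))
    (chunks : List (List (List Char))) :
    pvFilesOf ((l :: body) :: chunks) = pvFlush (pvNameOf l) (l :: body) ++ pvFilesOf chunks := by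
  simp only [pvFilesOf, pvFlush, List.map_cons, List.filter_cons, List.headD_cons]
  cases hn : (pvNameOf l).isEmpty <;> simp

-- main parse lemma: A's accumulator fold = B's chunker, as a generalized invariant
theorem pv_parse_main : ∀ (n : Nat) (rest : List (List Char)), rest.length = n →
    ∀ (fs : List (List Char × List Char)) (cf : List Char) (cl : List (List Char)),
      (rest.foldl pvStepA (fs, cf, cl)).1
          ++ pvFlush (rest.foldl pvStepA (fs, cf, cl)).2.1 (rest.foldl pvStepA (fs, cf, cl)).2.2
        = fs ++ pvFlush cf (cl ++ rest.takeWhile pvP)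
            ++ pvFilesOf (pvChunks (rest.dropWhile pvP)) := by
  intro n
  induction n using Nat.strong_induction_on with
  | _ n ih =>
    intro rest hn fs cf cl
    match rest with
    | [] =>
      simp [pvChunks, pvFilesOf]
    | l :: t =>
      cases hpl : PySem.Chars.startswith l pvMark with
      | false =>
        -- non-marker line: absorbed into current_lines
        have hp : pvP l = true := by simp [pvP, hpl]
        simp only [List.foldl_cons]
        rw [show pvStepA (fs, cf, cl) l = (fs, cf, cl ++ [l]) from by simp [pvStepA, hpl]]
        rw [ih t.length (by simp at hn; omega) t rfl fs cf (cl ++ [l])]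
        simp [hp]
      | true =>
        -- marker line: flush, then absorb the following non-marker body
        have hbody : ∀ x ∈ t.takeWhile pvP, pvP x = true := fun x hx => List.mem_takeWhile_imp hx
        have hn' : t.length + 1 = n := by simpa using hn
        simp only [List.foldl_cons]
        rw [pv_step_marker fs cf cl l hpl]
        have habs : List.foldl pvStepA (fs ++ pvFlush cf cl, pvNameOf l, [l]) t
            = List.foldl pvStepA (fs ++ pvFlush cf cl, pvNameOf l, [l] ++ t.takeWhile pvP)
                (t.dropWhile pvP) := by
          conv_lhs => rw [show t = t.takeWhile pvP ++ t.dropWhile pvP from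
            (List.takeWhile_append_dropWhile).symm]
          rw [pv_absorb (t.takeWhile pvP) hbody (t.dropWhile pvP) _ _ _]
        rw [habs]
        have hlen : (t.dropWhile pvP).length < n := by
          have := List.length_dropWhile_le pvP t
          omega
        rw [ih (t.dropWhile pvP).length hlen (t.dropWhile pvP) rfl _ _ _]
        have ht2take : (t.dropWhile pvP).takeWhile pvP = [] := pv_takeWhile_dropWhile pvP t
        have ht2drop : (t.dropWhile pvP).dropWhile pvP = t.dropWhile pvP :=
          List.dropWhile_idempotent pvP t
        rw [ht2take, ht2drop]
        -- B side: one chunk = the marker line plus its body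
        have hchunk : pvChunks ((l :: t).dropWhile pvP)
            = (l :: t.takeWhile pvP) :: pvChunks (t.dropWhile pvP) := by
          have hdw : (l :: t).dropWhile pvP = l :: t := by
            simp [pvP, hpl]
          rw [hdw, pvChunks]
          have htw : t.takeWhile (fun x => !PySem.Chars.startswith x pvMark) = t.takeWhile pvP := rfl
          simp only [htw, List.take_succ_cons, List.drop_succ_cons]
          rw [pv_take_takeWhile pvP t, pv_drop_takeWhile pvP t]
        have htake : (l :: t).takeWhile pvP = [] := by
          simp [pvP, hpl]
        rw [hchunk, htake, pv_filesOf_cons]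
        simp

-- phase 1, as the two ports write it: A's parse-and-finish = B's chunk-name-filter
theorem pv_phase1 (lines : List (List Char)) :
    (if !((lines.foldl pvStepA ([], [], [])).2.1).isEmpty
        && !((lines.foldl pvStepA ([], [], [])).2.2).isEmpty then
      (lines.foldl pvStepA ([], [], [])).1
        ++ [((lines.foldl pvStepA ([], [], [])).2.1,
             PySem.Chars.join [] (lines.foldl pvStepA ([], [], [])).2.2)]
     else (lines.foldl pvStepA ([], [], [])).1)
    = ((pvChunks (pvDropPre lines)).map
        (fun c => (pvNameOf (c.headD []), PySem.Chars.join [] c))).filter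
        (fun fc => !fc.1.isEmpty) := by
  have h := pv_parse_main lines.length lines rfl [] [] []
  have hfin : (if !((lines.foldl pvStepA ([], [], [])).2.1).isEmpty
        && !((lines.foldl pvStepA ([], [], [])).2.2).isEmpty then
      (lines.foldl pvStepA ([], [], [])).1
        ++ [((lines.foldl pvStepA ([], [], [])).2.1,
             PySem.Chars.join [] (lines.foldl pvStepA ([], [], [])).2.2)]
     else (lines.foldl pvStepA ([], [], [])).1)
      = (lines.foldl pvStepA ([], [], [])).1
          ++ pvFlush (lines.foldl pvStepA ([], [], [])).2.1
              (lines.foldl pvStepA ([], [], [])).2.2 := by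
    simp only [pvFlush]; split <;> simp
  rw [hfin, h, pvDropPre_eq_dropWhile]
  simp [pvFlush, pvFilesOf]

-- phase 2: a filtered-append fold is filter-then-map
theorem pv_phase2 {α β : Type} (p : α → Bool) (g : α → β) (l : List α) :
    l.foldl (fun acc x => if !p x then acc else acc ++ [g x]) []
      = (l.filter p).map g := by
  have h : ∀ (acc : List β),
      l.foldl (fun acc x => if !p x then acc else acc ++ [g x]) acc
        = acc ++ (l.filter p).map g := by
    induction l with
    | nil => intro acc; simp
    | cons x t ih =>
      intro acc
      simp only [List.foldl_cons, List.filter_cons]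
      cases hx : p x
      · rw [if_pos (by simp [hx]), ih acc]
        simp
      · rw [if_neg (by simp [hx]), ih (acc ++ [g x])]
        simp
  simpa using h []

-- once one file is skipped, every later (at-least-as-large) file is skipped too
theorem pv_skip_all (budget : Int) :
    ∀ (l : List (List Char × List Char)) (kept : List (List Char)) (used : Int)
      (skipped : List (List Char)),
      (∀ y ∈ l, used + (y.2.length : Int) > budget) →
      l.foldl
        (fun (st : List (List Char) × Int × List (List Char)) fd =>
          if st.2.1 + (fd.2.length : Int) > budget then (st.1, st.2.1, st.2.2 ++ [fd.1])
          else (st.1 ++ [fd.2], st.2.1 + (fd.2.length : Int), st.2.2))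
        (kept, used, skipped)
      = (kept, used, skipped ++ l.map (·.1)) := by
  intro l
  induction l with
  | nil => intro kept used skipped _; simp
  | cons fd t ih =>
    intro kept used skipped h
    have hfd := h fd (by simp)
    simp only [List.foldl_cons, if_pos hfd]
    rw [ih kept used (skipped ++ [fd.1]) (fun y hy => h y (by simp [hy]))]
    simp

-- the greedy kept/used/skipped fold over a size-sorted list = prefix cut
theorem pv_greedy_cut (budget : Int) :
    ∀ (ordered : List (List Char × List Char)),
      ordered.Pairwise (fun a b => a.2.length ≤ b.2.length) →
      ∀ (kept : List (List Char)) (used : Int) (skipped : List (List Char)),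
      ordered.foldl
        (fun (st : List (List Char) × Int × List (List Char)) fd =>
          if st.2.1 + (fd.2.length : Int) > budget then (st.1, st.2.1, st.2.2 ++ [fd.1])
          else (st.1 ++ [fd.2], st.2.1 + (fd.2.length : Int), st.2.2))
        (kept, used, skipped)
      = (kept ++ ((ordered.take (pvCut (ordered.map (fun fd => (fd.2.length : Int))) used budget)).map (·.2)),
         used + (((ordered.take (pvCut (ordered.map (fun fd => (fd.2.length : Int))) used budget)).map
                  (fun fd => (fd.2.length : Int))).sum),
         skipped ++ ((ordered.drop (pvCut (ordered.map (fun fd => (fd.2.length : Int))) used budget)).map (·.1))) := by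
  intro ordered
  induction ordered with
  | nil => intro _ kept used skipped; simp [pvCut]
  | cons fd t ih =>
    intro h kept used skipped
    simp only [List.map_cons, List.foldl_cons, pvCut]
    by_cases hfit : used + (fd.2.length : Int) ≤ budget
    · rw [if_neg (by omega), if_pos hfit]
      rw [ih h.of_cons (kept ++ [fd.2]) (used + (fd.2.length : Int)) skipped]
      simp only [List.take_succ_cons, List.drop_succ_cons, List.map_cons, List.sum_cons,
        Prod.mk.injEq]
      refine ⟨by simp, by ring, by simp⟩
    · rw [if_pos (by omega), if_neg hfit]
      have hall : ∀ y ∈ t, used + (y.2.length : Int) > budget := by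
        intro y hy
        have hle : fd.2.length ≤ y.2.length := (List.pairwise_cons.mp h).1 y hy
        have : (fd.2.length : Int) ≤ (y.2.length : Int) := by exact_mod_cast hle
        omega
      rw [pv_skip_all budget t kept used (skipped ++ [fd.1]) hall]
      simp

-- ===== VERDICT (by name: the statement is the Claim_ definition above) =====
theorem preprocess_diff_spec : Claim_equal_preprocess_diff := by
  intro raw_diff max_tokens _
  unfold Spec_preprocess_diff
  simp only [preprocess_diff, preprocess_diff_alt]
  by_cases h1 : (PySem.Chars.strip raw_diff.toList).isEmpty = true
  · simp [h1]
  · rw [if_neg h1, if_neg h1]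
    rw [pv_phase1]
    rw [pv_phase2]
    simp only [pvHeader]
    by_cases h2 : (List.filter (fun fc => !fc.1.isEmpty)
        (List.map (fun c => (pvNameOf (c.headD []), PySem.Chars.join [] c))
          (pvChunks (pvDropPre (pvSplitKE [] raw_diff.toList))))).isEmpty = true
    · rw [if_pos h2, if_pos h2]
    · rw [if_neg h2, if_neg h2]
      split
      · rw [pv_greedy_cut (max_tokens * 4) _
          (PySem.List.sorted_pairwise _ _) [] 0 []]
        simp
      · rfl
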